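-- pv_equiv track=rewrite | github.com/mortyc126-debug/rayon | tension/rasloyenie.py | measure_stable_bits
-- ===== SOURCE A (Python) =====
-- M4 = 0xF
--
-- IV4 = [0x6,0xB,0x3,0xA,0x5,0x9,0x1,0x5]
--
-- K4 = [0x4,0x7,0xB,0xE,0x3,0x5,0x9,0xA,0xD,0x1,0x2,0x5,0x7,0x8,0x9,0xC]
--
-- def sha4(W, nr=64):
--     Ws = list(W[:16])
--     while len(Ws)<16: Ws.append(0)
--     for i in range(16, max(nr,16)):
--         Ws.append((Ws[i-2]^Ws[i-7]^Ws[i-15]^Ws[i-16])&M4)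
--     a,b,c,d,e,f,g,h = IV4
--     for r in range(nr):
--         ch=(e&f)^(~e&g)&M4; t1=(h+ch+K4[r%16]+Ws[r%len(Ws)])&M4
--         maj=(a&b)^(a&c)^(b&c); t2=(a^maj)&M4
--         h,g,f,e=g,f,e,(d+t1)&M4; d,c,b,a=c,b,a,(t1+t2)&M4
--     return tuple((IV4[i]+x)&M4 for i,x in enumerate([a,b,c,d,e,f,g,h]))
--
-- def measure_stable_bits(W_base, vary_word, n_rounds=64):
--     """Which output bits are STABLE when varying one W word?"""
--     hashes = []
--     for val in range(16):
--         W = list(W_base)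
--         W[vary_word] = val
--         hashes.append(sha4(W, n_rounds))
--
--     stable = []
--     for bit_pos in range(32):
--         word, bit = bit_pos // 4, bit_pos % 4
--         values = set((h[word] >> bit) & 1 for h in hashes)
--         if len(values) == 1:
--             stable.append(bit_pos)
--     return set(stable)
-- ===== SOURCE B (Python) =====
-- M4 = 0xF
--
-- IV4 = [0x6,0xB,0x3,0xA,0x5,0x9,0x1,0x5]
--
-- K4 = [0x4,0x7,0xB,0xE,0x3,0x5,0x9,0xA,0xD,0x1,0x2,0x5,0x7,0x8,0x9,0xC]
--
-- def sha4b(W, nr=64):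
--     # same hash function as A's sha4, written with a list-of-8 state and
--     # negative-index schedule recurrence instead of A's 8-tuple unpacking
--     Ws = (list(W[:16]) + [0]*16)[:16]
--     while len(Ws) < max(nr, 16):
--         Ws.append((Ws[-2] ^ Ws[-7] ^ Ws[-15] ^ Ws[-16]) & M4)
--     st = list(IV4)
--     for r in range(nr):
--         ch = (st[4] & st[5]) ^ (~st[4] & st[6]) & M4
--         t1 = (st[7] + ch + K4[r % 16] + Ws[r % len(Ws)]) & M4
--         maj = (st[0] & st[1]) ^ (st[0] & st[2]) ^ (st[1] & st[2])
--         t2 = (st[0] ^ maj) & M4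
--         st = [(t1 + t2) & M4, st[0], st[1], st[2], (st[3] + t1) & M4, st[4], st[5], st[6]]
--     return tuple((IV4[i] + st[i]) & M4 for i in range(8))
--
-- def measure_stable_bits(W_base, vary_word, n_rounds=64):
--     """Which output bits are STABLE when varying one W word?"""
--     acc_and = 0xFFFFFFFF
--     acc_or = 0
--     for val in range(16):
--         W = list(W_base)
--         W[vary_word] = val
--         h = sha4b(W, n_rounds)
--         packed = sum(h[w] << (4 * w) for w in range(8))
--         acc_and &= packed
--         acc_or |= packed
--     return {b for b in range(32) if (acc_and >> b) & 1 == (acc_or >> b) & 1}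
-- ===== Notes on version B (the rewrite author's own statement) =====
-- stated objective: alternative
-- what changed: B recomputes the hash with a list-of-8 state, fuel recursion and a negative-index schedule recurrence instead of A's 8-tuple unpacking and index folds, and replaces A's stored-hashes + per-bit inner scan by running bitwise AND/OR accumulators over packed 32-bit hashes: a bit is stable exactly where the AND and OR of all 16 packed hashes agree, so the final step is one 32-bit scan with no stored hash list and no inner loop over hashes.
import Mathlib
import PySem

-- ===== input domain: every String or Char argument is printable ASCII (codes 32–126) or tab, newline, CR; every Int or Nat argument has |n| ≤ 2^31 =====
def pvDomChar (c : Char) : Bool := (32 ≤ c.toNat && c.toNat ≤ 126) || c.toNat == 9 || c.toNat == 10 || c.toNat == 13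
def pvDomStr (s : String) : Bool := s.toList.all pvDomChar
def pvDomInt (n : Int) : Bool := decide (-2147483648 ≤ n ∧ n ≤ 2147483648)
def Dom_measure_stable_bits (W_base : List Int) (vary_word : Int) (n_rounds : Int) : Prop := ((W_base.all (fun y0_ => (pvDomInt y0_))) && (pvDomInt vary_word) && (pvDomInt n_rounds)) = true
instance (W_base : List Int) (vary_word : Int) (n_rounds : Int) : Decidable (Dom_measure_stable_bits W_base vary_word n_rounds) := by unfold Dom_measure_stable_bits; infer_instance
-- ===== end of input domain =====

-- B recomputes the hash with a list-of-8 state and fuel recursion instead of A's tuple folds, and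
-- replaces A's stored-hashes + per-bit inner scan by running bitwise AND/OR accumulators over
-- packed 32-bit hashes with a single 32-bit scan (objective: alternative algorithm).

-- ===== PORT A =====
-- module constants
def M4 : Int := 15
def IV4 : List Int := [6, 11, 3, 10, 5, 9, 1, 5]
def K4 : List Int := [4, 7, 11, 14, 3, 5, 9, 10, 13, 1, 2, 5, 7, 8, 9, 12]

-- A's helper sha4.
-- 'while len(Ws)<16: Ws.append(0)' is ported as appending the needed zeros;
-- Ws/K4 indices are always in range, so pyGetD's default 0 is never used.
def sha4 (W : List Int) (nr : Int) : List Int :=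
  let Ws0 := PySem.List.slice W none (some 16)
  let Ws1 := Ws0 ++ List.replicate (16 - Ws0.length) 0
  let Ws := (PySem.List.pyRange 16 (max nr 16)).foldl (fun ws i =>
      ws ++ [PySem.Int.band (PySem.Int.bxor (PySem.Int.bxor (PySem.Int.bxor
        (PySem.List.pyGetD ws (i - 2) 0) (PySem.List.pyGetD ws (i - 7) 0))
        (PySem.List.pyGetD ws (i - 15) 0)) (PySem.List.pyGetD ws (i - 16) 0)) M4]) Ws1
  let st := (PySem.List.pyRange 0 nr).foldl (fun st r =>
      match st with
      | (a, b, c, d, e, f, g, h) =>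
        let ch := PySem.Int.bxor (PySem.Int.band e f) (PySem.Int.band (PySem.Int.band (Int.not e) g) M4)
        let t1 := PySem.Int.band (h + ch + PySem.List.pyGetD K4 (PySem.Int.mod r 16) 0
                    + PySem.List.pyGetD Ws (PySem.Int.mod r (Ws.length : Int)) 0) M4
        let maj := PySem.Int.bxor (PySem.Int.bxor (PySem.Int.band a b) (PySem.Int.band a c)) (PySem.Int.band b c)
        let t2 := PySem.Int.band (PySem.Int.bxor a maj) M4
        (PySem.Int.band (t1 + t2) M4, a, b, c, PySem.Int.band (d + t1) M4, e, f, g))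
      ((6 : Int), (11 : Int), (3 : Int), (10 : Int), (5 : Int), (9 : Int), (1 : Int), (5 : Int))
  match st with
  | (a, b, c, d, e, f, g, h) =>
    -- 'tuple((IV4[i]+x)&M4 for i,x in enumerate([a,...,h]))' = zip with IV4 (both length 8)
    List.zipWith (fun iv x => PySem.Int.band (iv + x) M4) IV4 [a, b, c, d, e, f, g, h]

def measure_stable_bits (W_base : List Int) (vary_word : Int) (n_rounds : Int) : List Int :=
  let hashes := (PySem.List.pyRange 0 16).foldl (fun hs val =>
      let W := PySem.List.pySetD W_base vary_word val
      hs ++ [sha4 W n_rounds]) []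
  let stable := (PySem.List.pyRange 0 32).foldl (fun st bit_pos =>
      let word := PySem.Int.floordiv bit_pos 4
      let bit := PySem.Int.mod bit_pos 4
      let values := PySem.Set.ofList (hashes.map (fun (h : List Int) =>
          PySem.Int.band (PySem.List.pyGetD h word 0 >>> bit.toNat) 1))
      if values.length = 1 then st ++ [bit_pos] else st) []
  PySem.Set.ofList stable

-- ===== PORT B =====
-- B's sha4b: 'while len(Ws) < max(nr,16): Ws.append(Ws[-2]^Ws[-7]^Ws[-15]^Ws[-16] & M4)'
-- as fuel recursion on the number of missing words, with Python negative indexing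
def sha4bSched : Nat → List Int → List Int
  | 0, ws => ws
  | Nat.succ k, ws => sha4bSched k (ws ++ [PySem.Int.band (PySem.Int.bxor (PySem.Int.bxor (PySem.Int.bxor
      (PySem.List.pyGetD ws (-2) 0) (PySem.List.pyGetD ws (-7) 0))
      (PySem.List.pyGetD ws (-15) 0)) (PySem.List.pyGetD ws (-16) 0)) M4])

-- one round of B's loop body over the list-of-8 state st
def sha4bStep (Ws : List Int) (r : Int) (st : List Int) : List Int :=
  let ch := PySem.Int.bxor (PySem.Int.band (PySem.List.pyGetD st 4 0) (PySem.List.pyGetD st 5 0))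
      (PySem.Int.band (PySem.Int.band (Int.not (PySem.List.pyGetD st 4 0)) (PySem.List.pyGetD st 6 0)) M4)
  let t1 := PySem.Int.band (PySem.List.pyGetD st 7 0 + ch + PySem.List.pyGetD K4 (PySem.Int.mod r 16) 0
      + PySem.List.pyGetD Ws (PySem.Int.mod r (Ws.length : Int)) 0) M4
  let maj := PySem.Int.bxor (PySem.Int.bxor (PySem.Int.band (PySem.List.pyGetD st 0 0) (PySem.List.pyGetD st 1 0))
      (PySem.Int.band (PySem.List.pyGetD st 0 0) (PySem.List.pyGetD st 2 0)))
      (PySem.Int.band (PySem.List.pyGetD st 1 0) (PySem.List.pyGetD st 2 0))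
  let t2 := PySem.Int.band (PySem.Int.bxor (PySem.List.pyGetD st 0 0) maj) M4
  [PySem.Int.band (t1 + t2) M4, PySem.List.pyGetD st 0 0, PySem.List.pyGetD st 1 0, PySem.List.pyGetD st 2 0,
   PySem.Int.band (PySem.List.pyGetD st 3 0 + t1) M4, PySem.List.pyGetD st 4 0, PySem.List.pyGetD st 5 0,
   PySem.List.pyGetD st 6 0]

-- 'for r in range(nr)' as fuel recursion: with k rounds left the current index is nr - k
def sha4bRounds (Ws : List Int) (nr : Int) : Nat → List Int → List Int
  | 0, st => st
  | Nat.succ k, st => sha4bRounds Ws nr k (sha4bStep Ws (nr - ((k : Int) + 1)) st)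

def sha4b (W : List Int) (nr : Int) : List Int :=
  let Ws0 := PySem.List.slice (PySem.List.slice W none (some 16) ++ List.replicate 16 0) none (some 16)
  let Ws := sha4bSched ((max nr 16) - 16).toNat Ws0
  let st := sha4bRounds Ws nr nr.toNat IV4
  (PySem.List.pyRange 0 8).map (fun i =>
    PySem.Int.band (PySem.List.pyGetD IV4 i 0 + PySem.List.pyGetD st i 0) M4)

def measure_stable_bits_alt (W_base : List Int) (vary_word : Int) (n_rounds : Int) : List Int :=
  let acc := (PySem.List.pyRange 0 16).foldl (fun acc val =>
      let W := PySem.List.pySetD W_base vary_word val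
      let h := sha4b W n_rounds
      let packed := (PySem.List.pyRange 0 8).foldl (fun s w =>
          s + PySem.List.pyGetD h w 0 <<< (4 * w).toNat) 0
      (PySem.Int.band acc.1 packed, PySem.Int.bor acc.2 packed)) ((4294967295 : Int), (0 : Int))
  PySem.Set.ofList ((PySem.List.pyRange 0 32).filter (fun b =>
      PySem.Int.band (acc.1 >>> b.toNat) 1 == PySem.Int.band (acc.2 >>> b.toNat) 1))

-- ===== PRECONDITION & SPEC =====
-- Pre_ excludes exactly the inputs where 'W[vary_word] = val' raises IndexError in Python
-- (vary_word outside [-len(W_base), len(W_base))); A returns on every other input.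
def Pre_measure_stable_bits (W_base : List Int) (vary_word : Int) (n_rounds : Int) : Prop :=
  PySem.Raise.InRange W_base.length vary_word
instance (W_base : List Int) (vary_word : Int) (n_rounds : Int) : Decidable (Pre_measure_stable_bits W_base vary_word n_rounds) := by unfold Pre_measure_stable_bits; infer_instance

def pvWitness_measure_stable_bits : List Int × Int × Int := ([3, 1, 4, 1, 5], 2, 8)

def Spec_measure_stable_bits (W_base : List Int) (vary_word : Int) (n_rounds : Int) (out : List Int) : Prop := out = measure_stable_bits_alt W_base vary_word n_rounds
instance (W_base : List Int) (vary_word : Int) (n_rounds : Int) (out : List Int) : Decidable (Spec_measure_stable_bits W_base vary_word n_rounds out) := by unfold Spec_measure_stable_bits; infer_instance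

-- ===== CLAIM (what is proved, stated in full; the proofs are below) =====
def Claim_equal_measure_stable_bits : Prop := ∀ (W_base : List Int) (vary_word : Int) (n_rounds : Int), Dom_measure_stable_bits W_base vary_word n_rounds → Pre_measure_stable_bits W_base vary_word n_rounds → Spec_measure_stable_bits W_base vary_word n_rounds (measure_stable_bits W_base vary_word n_rounds)

-- ===== LEMMAS AND PROOFS =====

-- ---- part 1: B's sha4b computes the same hash as A's sha4 ----

-- proof-only names for A's schedule fold and round fold (verbatim copies of sha4's inner folds)
def pvWsA (W : List Int) (nr : Int) : List Int :=
  (PySem.List.pyRange 16 (max nr 16)).foldl (fun ws i =>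
      ws ++ [PySem.Int.band (PySem.Int.bxor (PySem.Int.bxor (PySem.Int.bxor
        (PySem.List.pyGetD ws (i - 2) 0) (PySem.List.pyGetD ws (i - 7) 0))
        (PySem.List.pyGetD ws (i - 15) 0)) (PySem.List.pyGetD ws (i - 16) 0)) M4])
    (PySem.List.slice W none (some 16)
      ++ List.replicate (16 - (PySem.List.slice W none (some 16)).length) 0)

def pvStA (Ws : List Int) (nr : Int) : Int × Int × Int × Int × Int × Int × Int × Int :=
  (PySem.List.pyRange 0 nr).foldl (fun st r =>
      match st with
      | (a, b, c, d, e, f, g, h) =>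
        let ch := PySem.Int.bxor (PySem.Int.band e f) (PySem.Int.band (PySem.Int.band (Int.not e) g) M4)
        let t1 := PySem.Int.band (h + ch + PySem.List.pyGetD K4 (PySem.Int.mod r 16) 0
                    + PySem.List.pyGetD Ws (PySem.Int.mod r (Ws.length : Int)) 0) M4
        let maj := PySem.Int.bxor (PySem.Int.bxor (PySem.Int.band a b) (PySem.Int.band a c)) (PySem.Int.band b c)
        let t2 := PySem.Int.band (PySem.Int.bxor a maj) M4
        (PySem.Int.band (t1 + t2) M4, a, b, c, PySem.Int.band (d + t1) M4, e, f, g))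
    ((6 : Int), (11 : Int), (3 : Int), (10 : Int), (5 : Int), (9 : Int), (1 : Int), (5 : Int))

-- B's initial 16-word block equals A's zero-padded one
theorem pvInit (W : List Int) :
    PySem.List.slice (PySem.List.slice W none (some 16) ++ List.replicate 16 0) none (some 16)
      = PySem.List.slice W none (some 16)
        ++ List.replicate (16 - (PySem.List.slice W none (some 16)).length) 0 := by
  rw [PySem.List.slice_to _ (by norm_num), PySem.List.slice_to _ (by norm_num)]
  rw [List.take_append, List.take_of_length_le (by simp), List.take_replicate]
  congr 2
  simp [List.length_take]

-- B's fuel-recursive schedule equals A's index fold, over any ws of length >= 16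
theorem pvSched (k : Nat) : ∀ (ws : List Int), 16 ≤ ws.length →
    sha4bSched k ws = (PySem.List.pyRange (ws.length : Int) ((ws.length : Int) + k)).foldl (fun ws i =>
      ws ++ [PySem.Int.band (PySem.Int.bxor (PySem.Int.bxor (PySem.Int.bxor
        (PySem.List.pyGetD ws (i - 2) 0) (PySem.List.pyGetD ws (i - 7) 0))
        (PySem.List.pyGetD ws (i - 15) 0)) (PySem.List.pyGetD ws (i - 16) 0)) M4]) ws := by
  induction k with
  | zero =>
    intro ws h
    rw [sha4bSched]
    rw [show ((ws.length : Int) + (0 : Nat)) = (ws.length : Int) from by push_cast; ring]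
    rw [PySem.List.pyRange_one_eq_nil le_rfl]
    rfl
  | succ k ih =>
    intro ws h
    rw [PySem.List.pyRange_one_cons (by push_cast; omega), List.foldl_cons]
    have hidx : ∀ (j : Nat), 0 < j → j ≤ ws.length →
        PySem.List.pyGetD ws ((ws.length : Int) - (j : Int)) 0 = PySem.List.pyGetD ws (-(j : Int)) 0 := by
      intro j hj hjle
      rw [PySem.List.pyGetD_neg_natCast ws j 0 hj hjle,
        show ((ws.length : Int) - (j : Int)) = ((ws.length - j : Nat) : Int) from by push_cast [hjle]; ring,
        PySem.List.pyGetD_natCast, List.getD_eq_getElem _ _ (by omega)]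
    have h2 := hidx 2 (by omega) (by omega)
    have h7 := hidx 7 (by omega) (by omega)
    have h15 := hidx 15 (by omega) (by omega)
    have h16 := hidx 16 (by omega) (by omega)
    norm_num at h2 h7 h15 h16
    rw [sha4bSched, ih _ (by simp; omega)]
    have hlen : (((ws ++ [PySem.Int.band (PySem.Int.bxor (PySem.Int.bxor (PySem.Int.bxor
        (PySem.List.pyGetD ws (-2) 0) (PySem.List.pyGetD ws (-7) 0))
        (PySem.List.pyGetD ws (-15) 0)) (PySem.List.pyGetD ws (-16) 0)) M4]).length : Int))
        = (ws.length : Int) + 1 := by simp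
    rw [hlen]
    rw [show (ws.length : Int) + 1 + (k : Int) = (ws.length : Int) + ((k + 1 : Nat) : Int) from by push_cast; ring]
    rw [h2, h7, h15, h16]

-- B's list-of-8 round recursion equals A's tuple fold
theorem pvRounds (Ws : List Int) (nr : Int) (k : Nat) :
    ∀ (a b c d e f g h : Int),
    sha4bRounds Ws nr k [a, b, c, d, e, f, g, h]
      = (match (PySem.List.pyRange (nr - k) nr).foldl (fun st r =>
          match st with
          | (a, b, c, d, e, f, g, h) =>
            let ch := PySem.Int.bxor (PySem.Int.band e f) (PySem.Int.band (PySem.Int.band (Int.not e) g) M4)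
            let t1 := PySem.Int.band (h + ch + PySem.List.pyGetD K4 (PySem.Int.mod r 16) 0
                        + PySem.List.pyGetD Ws (PySem.Int.mod r (Ws.length : Int)) 0) M4
            let maj := PySem.Int.bxor (PySem.Int.bxor (PySem.Int.band a b) (PySem.Int.band a c)) (PySem.Int.band b c)
            let t2 := PySem.Int.band (PySem.Int.bxor a maj) M4
            (PySem.Int.band (t1 + t2) M4, a, b, c, PySem.Int.band (d + t1) M4, e, f, g))
          (a, b, c, d, e, f, g, h) with
        | (a, b, c, d, e, f, g, h) => [a, b, c, d, e, f, g, h]) := by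
  induction k with
  | zero =>
    intro a b c d e f g h
    rw [sha4bRounds]
    rw [show nr - ((0 : Nat) : Int) = nr from by push_cast; ring]
    rw [PySem.List.pyRange_one_eq_nil le_rfl]
    rfl
  | succ k ih =>
    intro a b c d e f g h
    rw [sha4bRounds]
    rw [PySem.List.pyRange_one_cons (by push_cast; omega), List.foldl_cons]
    rw [show nr - ((k + 1 : Nat) : Int) + 1 = nr - (k : Int) from by push_cast; ring]
    have hstep : sha4bStep Ws (nr - ((k : Int) + 1)) [a, b, c, d, e, f, g, h]
        = [PySem.Int.band
             (PySem.Int.band (h + (PySem.Int.bxor (PySem.Int.band e f)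
                (PySem.Int.band (PySem.Int.band (Int.not e) g) M4))
                + PySem.List.pyGetD K4 (PySem.Int.mod (nr - ((k : Int) + 1)) 16) 0
                + PySem.List.pyGetD Ws (PySem.Int.mod (nr - ((k : Int) + 1)) (Ws.length : Int)) 0) M4
              + PySem.Int.band (PySem.Int.bxor a (PySem.Int.bxor (PySem.Int.bxor (PySem.Int.band a b)
                  (PySem.Int.band a c)) (PySem.Int.band b c))) M4) M4,
           a, b, c,
           PySem.Int.band (d + PySem.Int.band (h + (PySem.Int.bxor (PySem.Int.band e f)
                (PySem.Int.band (PySem.Int.band (Int.not e) g) M4))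
                + PySem.List.pyGetD K4 (PySem.Int.mod (nr - ((k : Int) + 1)) 16) 0
                + PySem.List.pyGetD Ws (PySem.Int.mod (nr - ((k : Int) + 1)) (Ws.length : Int)) 0) M4) M4,
           e, f, g] := by
      simp [sha4bStep, PySem.List.pyGetD]
    rw [hstep, ih]
    rfl

-- B's final comprehension equals A's zipWith
theorem pvFinal (a b c d e f g h : Int) :
    (PySem.List.pyRange 0 8).map (fun i =>
        PySem.Int.band (PySem.List.pyGetD [(6:Int), 11, 3, 10, 5, 9, 1, 5] i 0
          + PySem.List.pyGetD [a, b, c, d, e, f, g, h] i 0) M4)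
      = List.zipWith (fun iv x => PySem.Int.band (iv + x) M4) [(6:Int), 11, 3, 10, 5, 9, 1, 5]
          [a, b, c, d, e, f, g, h] := by
  rw [show PySem.List.pyRange 0 8 = [0, 1, 2, 3, 4, 5, 6, 7] from by decide]
  simp [PySem.List.pyGetD]

theorem pvRangeFix (nr : Int) :
    PySem.List.pyRange (nr - (nr.toNat : Int)) nr = PySem.List.pyRange 0 nr := by
  by_cases h : 0 ≤ nr
  · rw [Int.toNat_of_nonneg h]
    rw [show nr - nr = 0 from by ring]
  · rw [show nr.toNat = 0 from by omega]
    rw [show nr - ((0 : Nat) : Int) = nr from by push_cast; ring]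
    rw [PySem.List.pyRange_one_eq_nil le_rfl, PySem.List.pyRange_one_eq_nil (by omega)]

-- the hash computed by B equals the hash computed by A
theorem pvSha4_eq (W : List Int) (nr : Int) : sha4b W nr = sha4 W nr := by
  have hA : sha4 W nr = (match pvStA (pvWsA W nr) nr with
      | (a, b, c, d, e, f, g, h) =>
        List.zipWith (fun iv x => PySem.Int.band (iv + x) M4) IV4 [a, b, c, d, e, f, g, h]) := rfl
  have hB : sha4b W nr = (PySem.List.pyRange 0 8).map (fun i =>
      PySem.Int.band (PySem.List.pyGetD IV4 i 0 + PySem.List.pyGetD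
        (sha4bRounds (sha4bSched ((max nr 16) - 16).toNat
          (PySem.List.slice (PySem.List.slice W none (some 16) ++ List.replicate 16 0) none (some 16)))
          nr nr.toNat IV4) i 0) M4) := rfl
  rw [hA, hB, pvInit]
  have h16 : (PySem.List.slice W none (some 16)
      ++ List.replicate (16 - (PySem.List.slice W none (some 16)).length) 0).length = 16 := by
    rw [PySem.List.slice_to _ (by norm_num)]
    simp [List.length_take]
  rw [pvSched ((max nr 16) - 16).toNat _ h16.ge, h16]
  rw [show (((16 : Nat) : Int)) + ((((max nr 16) - 16).toNat : Nat) : Int) = max nr 16 from by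
    rw [Int.toNat_of_nonneg (by omega)]
    push_cast
    omega]
  rw [show (((16 : Nat) : Int)) = (16 : Int) from rfl]
  rw [show (PySem.List.pyRange 16 (max nr 16)).foldl (fun ws i =>
      ws ++ [PySem.Int.band (PySem.Int.bxor (PySem.Int.bxor (PySem.Int.bxor
        (PySem.List.pyGetD ws (i - 2) 0) (PySem.List.pyGetD ws (i - 7) 0))
        (PySem.List.pyGetD ws (i - 15) 0)) (PySem.List.pyGetD ws (i - 16) 0)) M4])
      (PySem.List.slice W none (some 16)
        ++ List.replicate (16 - (PySem.List.slice W none (some 16)).length) 0) = pvWsA W nr from rfl]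
  rw [show (IV4 : List Int) = [(6:Int), 11, 3, 10, 5, 9, 1, 5] from rfl]
  rw [pvRounds]
  rw [pvRangeFix]
  rw [show ((PySem.List.pyRange 0 nr).foldl (fun st r =>
      match st with
      | (a, b, c, d, e, f, g, h) =>
        let ch := PySem.Int.bxor (PySem.Int.band e f) (PySem.Int.band (PySem.Int.band (Int.not e) g) M4)
        let t1 := PySem.Int.band (h + ch + PySem.List.pyGetD K4 (PySem.Int.mod r 16) 0
                    + PySem.List.pyGetD (pvWsA W nr) (PySem.Int.mod r ((pvWsA W nr).length : Int)) 0) M4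
        let maj := PySem.Int.bxor (PySem.Int.bxor (PySem.Int.band a b) (PySem.Int.band a c)) (PySem.Int.band b c)
        let t2 := PySem.Int.band (PySem.Int.bxor a maj) M4
        (PySem.Int.band (t1 + t2) M4, a, b, c, PySem.Int.band (d + t1) M4, e, f, g))
      ((6 : Int), (11 : Int), (3 : Int), (10 : Int), (5 : Int), (9 : Int), (1 : Int), (5 : Int)))
      = pvStA (pvWsA W nr) nr from rfl]
  rcases hst : pvStA (pvWsA W nr) nr with ⟨a, b, c, d, e, f, g, h⟩
  exact pvFinal a b c d e f g h

-- ---- part 2: AND/OR accumulators compute A's per-bit stability test ----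

-- the packed value B computes for one hash (definitionally the inline fold in the port)
abbrev pvPk (h : List Int) : Int :=
  (PySem.List.pyRange 0 8).foldl (fun s w => s + PySem.List.pyGetD h w 0 <<< (4 * w).toNat) 0

-- n.testBit b via division
theorem pvTestBit_div (n b : Nat) : n.testBit b = decide (n / 2 ^ b % 2 = 1) := by
  have h1 : (1 : Nat) &&& (n >>> b) = (n >>> b) % 2 := by
    rw [Nat.and_comm, Nat.and_one_is_mod]
  rw [Nat.testBit, h1, Nat.shiftRight_eq_div_pow]
  rcases Nat.mod_two_eq_zero_or_one (n / 2 ^ b) with h | h <;> simp [h]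

theorem pvNatBit (n b : Nat) : ((n >>> b) &&& 1 : Nat) = cond (n.testBit b) 1 0 := by
  rw [pvTestBit_div, Nat.and_one_is_mod, Nat.shiftRight_eq_div_pow]
  rcases Nat.mod_two_eq_zero_or_one (n / 2 ^ b) with h | h <;> simp [h]

-- z & 15 is a Nat below 16
theorem pvBand15 (z : Int) : ∃ n : Nat, n < 16 ∧ PySem.Int.band z 15 = (n : Int) := by
  unfold PySem.Int.band
  split_ifs with h1 h2 h2
  · exact ⟨z.toNat &&& (15 : Int).toNat, by
      have := @Nat.and_le_right z.toNat (15 : Int).toNat; omega, rfl⟩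
  · omega
  · exact ⟨(15 : Int).toNat - ((15 : Int).toNat &&& (-z - 1).toNat), by omega, rfl⟩
  · omega

-- sha4 returns 8 words, each a Nat below 16
theorem pvSha4_spec (W : List Int) (nr : Int) :
    (sha4 W nr).length = 8 ∧ ∀ y ∈ sha4 W nr, ∃ n : Nat, n < 16 ∧ y = (n : Int) := by
  have key : ∀ (st : Int × Int × Int × Int × Int × Int × Int × Int),
      ((match st with
        | (a, b, c, d, e, f, g, h) =>
          List.zipWith (fun iv x => PySem.Int.band (iv + x) M4) IV4 [a, b, c, d, e, f, g, h]) : List Int).length = 8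
      ∧ ∀ y ∈ (match st with
        | (a, b, c, d, e, f, g, h) =>
          List.zipWith (fun iv x => PySem.Int.band (iv + x) M4) IV4 [a, b, c, d, e, f, g, h]), ∃ n : Nat, n < 16 ∧ y = (n : Int) := by
    rintro ⟨a, b, c, d, e, f, g, h⟩
    constructor
    · rfl
    · intro y hy
      simp only [IV4, M4, List.zipWith, List.mem_cons, List.not_mem_nil, or_false] at hy
      rcases hy with rfl | rfl | rfl | rfl | rfl | rfl | rfl | rfl <;> exact pvBand15 _
  simp only [sha4]
  exact key _

set_option maxHeartbeats 2000000 in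
theorem pvDig (n0 n1 n2 n3 n4 n5 n6 n7 : Nat) (h0 : n0 < 16) (h1 : n1 < 16) (h2 : n2 < 16)
    (h3 : n3 < 16) (h4 : n4 < 16) (h5 : n5 < 16) (h6 : n6 < 16) (h7 : n7 < 16)
    (bp : Nat) (hbp : bp < 32) :
    (n0 + 16*n1 + 256*n2 + 4096*n3 + 65536*n4 + 1048576*n5 + 16777216*n6 + 268435456*n7).testBit bp
    = (([n0,n1,n2,n3,n4,n5,n6,n7].getD (bp / 4) 0).testBit (bp % 4)) := by
  interval_cases bp <;>
    · simp only [Nat.reduceDiv, Nat.reduceMod, List.getD_cons_zero, List.getD_cons_succ, pvTestBit_div]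
      rw [decide_eq_decide]; omega

theorem pvBitex (M b : Nat) : PySem.Int.band (((M : Nat) : Int) >>> b) 1 = (cond (M.testBit b) 1 0 : Int) := by
  have h1 : ((M : Int) >>> b) = ((M >>> b : Nat) : Int) := rfl
  have h2 : (1 : Int) = ((1 : Nat) : Int) := rfl
  rw [h1, h2, PySem.Int.band_natCast, pvNatBit]
  cases M.testBit b <;> simp

-- per-hash bridge: A's bit extraction = bit of B's packed value; packed value is a Nat < 2^32
theorem pvHBridge (h : List Int)
    (hh : h.length = 8 ∧ ∀ y ∈ h, ∃ n : Nat, n < 16 ∧ y = (n : Int)) (b : Nat) (hb : b < 32) :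
    PySem.Int.band (PySem.List.pyGetD h (PySem.Int.floordiv (b : Int) 4) 0 >>> (PySem.Int.mod (b : Int) 4).toNat) 1
      = (cond ((pvPk h).toNat.testBit b) 1 0 : Int)
    ∧ pvPk h = ((pvPk h).toNat : Int) := by
  obtain ⟨hlen, hmem⟩ := hh
  rcases h with _ | ⟨y0, h⟩; · simp at hlen
  rcases h with _ | ⟨y1, h⟩; · simp at hlen
  rcases h with _ | ⟨y2, h⟩; · simp at hlen
  rcases h with _ | ⟨y3, h⟩; · simp at hlen
  rcases h with _ | ⟨y4, h⟩; · simp at hlen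
  rcases h with _ | ⟨y5, h⟩; · simp at hlen
  rcases h with _ | ⟨y6, h⟩; · simp at hlen
  rcases h with _ | ⟨y7, h⟩; · simp at hlen
  have he : h = [] := by cases h with | nil => rfl | cons a t => simp at hlen
  subst he
  obtain ⟨n0, hn0, rfl⟩ := hmem y0 (by simp)
  obtain ⟨n1, hn1, rfl⟩ := hmem y1 (by simp)
  obtain ⟨n2, hn2, rfl⟩ := hmem y2 (by simp)
  obtain ⟨n3, hn3, rfl⟩ := hmem y3 (by simp)
  obtain ⟨n4, hn4, rfl⟩ := hmem y4 (by simp)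
  obtain ⟨n5, hn5, rfl⟩ := hmem y5 (by simp)
  obtain ⟨n6, hn6, rfl⟩ := hmem y6 (by simp)
  obtain ⟨n7, hn7, rfl⟩ := hmem y7 (by simp)
  have hsh : ∀ (n k : Nat), ((n : Int) <<< k) = ((n <<< k : Nat) : Int) := fun _ _ => rfl
  have hr : PySem.List.pyRange 0 8 = [0, 1, 2, 3, 4, 5, 6, 7] := by decide
  have hpk : pvPk [(n0 : Int), n1, n2, n3, n4, n5, n6, n7]
      = ((n0 + 16*n1 + 256*n2 + 4096*n3 + 65536*n4 + 1048576*n5 + 16777216*n6 + 268435456*n7 : Nat) : Int) := by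
    rw [pvPk, hr]
    simp only [List.foldl_cons, List.foldl_nil, PySem.List.pyGetD_ofNat', List.getD_cons_zero,
      List.getD_cons_succ]
    norm_num [hsh, Nat.shiftLeft_eq]
    push_cast
    ring
  constructor
  · have hf4 : PySem.Int.floordiv (b : Int) 4 = ((b / 4 : Nat) : Int) := by
      have := PySem.Int.floordiv_natCast b 4; simpa using this
    have hm4 : PySem.Int.mod (b : Int) 4 = ((b % 4 : Nat) : Int) := by
      have := PySem.Int.mod_natCast b 4; simpa using this
    rw [hf4, hm4, PySem.List.pyGetD_natCast, Int.toNat_natCast]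
    have hgd : ([(n0 : Int), n1, n2, n3, n4, n5, n6, n7]).getD (b / 4) 0
        = (([n0, n1, n2, n3, n4, n5, n6, n7].getD (b / 4) 0 : Nat) : Int) := by
      rw [show [(n0 : Int), n1, n2, n3, n4, n5, n6, n7]
            = [n0, n1, n2, n3, n4, n5, n6, n7].map (fun n : Nat => (n : Int)) from rfl]
      simpa using List.getD_map [n0, n1, n2, n3, n4, n5, n6, n7] 0 (fun n : Nat => (n : Int))
    rw [hgd, pvBitex, hpk, Int.toNat_natCast,
      pvDig n0 n1 n2 n3 n4 n5 n6 n7 hn0 hn1 hn2 hn3 hn4 hn5 hn6 hn7 b hb]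
  · rw [hpk, Int.toNat_natCast]

-- (Set.ofList xs).length = 1 iff xs has exactly one distinct member
theorem pvSingleton (l : List Int) (hn : l.Nodup) (a : Int) (hm : ∀ x, x ∈ l ↔ x = a) : l = [a] := by
  cases l with
  | nil => exact absurd ((hm a).2 rfl) (by simp)
  | cons x t =>
    have hx : x = a := (hm x).1 (by simp)
    subst hx
    have ht : t = [] := by
      by_contra hne
      obtain ⟨y, hy⟩ := List.exists_mem_of_ne_nil t hne
      have hya : y = x := (hm y).1 (by simp [hy])
      subst hya
      exact (List.nodup_cons.mp hn).1 hy
    rw [ht]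

theorem pvSetLen1 (xs : List Int) :
    ((PySem.Set.ofList xs).length = 1) ↔ ∃ a, ∀ x, x ∈ xs ↔ x = a := by
  rw [List.length_eq_one_iff]
  constructor
  · rintro ⟨a, ha⟩
    exact ⟨a, fun x => by rw [← PySem.Set.mem_ofList xs x, ha]; simp⟩
  · rintro ⟨a, ha⟩
    exact ⟨a, pvSingleton _ (PySem.Set.nodup_ofList xs) a (fun x => by rw [PySem.Set.mem_ofList]; exact ha x)⟩

theorem pvAllAny (bs : List Bool) (hne : bs ≠ []) :
    (∃ a : Int, ∀ x, (x ∈ bs.map (fun v => cond v (1 : Int) 0)) ↔ x = a)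
      ↔ (bs.all id = bs.any id) := by
  obtain ⟨b0, t, rfl⟩ := List.exists_cons_of_ne_nil hne
  constructor
  · rintro ⟨a, ha⟩
    have h0 : (cond b0 (1:Int) 0) = a := (ha _).1 (List.mem_map_of_mem (by simp))
    have hall : ∀ v ∈ b0 :: t, v = b0 := by
      intro v hv
      have h1 : (cond v (1:Int) 0) = a := (ha _).1 (List.mem_map_of_mem hv)
      have h2 := h1.trans h0.symm
      cases v <;> cases b0 <;> simp_all <;> omega
    have hrep : b0 :: t = List.replicate (b0 :: t).length b0 := List.eq_replicate_of_mem hall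
    rw [hrep]
    cases b0 <;> simp
  · intro heq
    by_cases hall : (b0 :: t).all id = true
    · refine ⟨1, fun x => ?_⟩
      simp only [List.mem_map]
      constructor
      · rintro ⟨v, hv, rfl⟩
        have hv' : v = true := by simpa using List.all_eq_true.mp hall v hv
        simp [hv']
      · rintro rfl
        have hb : b0 = true := by simpa using List.all_eq_true.mp hall b0 (by simp)
        exact ⟨b0, by simp, by simp [hb]⟩
    · have hany : (b0 :: t).any id = false := by
        rw [← heq]; simpa using hall
      have hf : ∀ v ∈ b0 :: t, v = false := by
        intro v hv
        by_contra h
        have hv' : v = true := by cases v <;> simp_all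
        have : (b0 :: t).any id = true := List.any_eq_true.2 ⟨v, hv, by simp [hv']⟩
        simp [this] at hany
      refine ⟨0, fun x => ?_⟩
      simp only [List.mem_map]
      constructor
      · rintro ⟨v, hv, rfl⟩
        simp [hf v hv]
      · rintro rfl
        exact ⟨b0, by simp, by simp [hf b0 (by simp)]⟩

theorem pvFoldAnd (l : List Nat) (m : Nat) (b : Nat) :
    (l.foldl (fun a n => a &&& n) m).testBit b = (m.testBit b && l.all (fun n => n.testBit b)) := by
  induction l generalizing m with
  | nil => simp
  | cons n t ih => simp [ih, Bool.and_assoc]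

theorem pvFoldOr (l : List Nat) (m : Nat) (b : Nat) :
    (l.foldl (fun a n => a ||| n) m).testBit b = (m.testBit b || l.any (fun n => n.testBit b)) := by
  induction l generalizing m with
  | nil => simp
  | cons n t ih => simp [ih, Bool.or_assoc]

theorem pvFoldBandCast (l : List (List Int)) (m : Nat)
    (hc : ∀ h ∈ l, pvPk h = ((pvPk h).toNat : Int)) :
    l.foldl (fun a h => PySem.Int.band a (pvPk h)) (m : Int)
      = ((l.foldl (fun a h => a &&& (pvPk h).toNat) m : Nat) : Int) := by
  induction l generalizing m with
  | nil => simp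
  | cons h t ih =>
    simp only [List.foldl_cons]
    rw [hc h (by simp), PySem.Int.band_natCast, Int.toNat_natCast, ih _ (fun x hx => hc x (by simp [hx]))]

theorem pvFoldBorCast (l : List (List Int)) (m : Nat)
    (hc : ∀ h ∈ l, pvPk h = ((pvPk h).toNat : Int)) :
    l.foldl (fun a h => PySem.Int.bor a (pvPk h)) (m : Int)
      = ((l.foldl (fun a h => a ||| (pvPk h).toNat) m : Nat) : Int) := by
  induction l generalizing m with
  | nil => simp
  | cons h t ih =>
    simp only [List.foldl_cons]
    rw [hc h (by simp), PySem.Int.bor_natCast, Int.toNat_natCast, ih _ (fun x hx => hc x (by simp [hx]))]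

-- the core per-bit equivalence, over an abstract list of hashes
theorem pvCore (hs : List (List Int)) (hne : hs ≠ [])
    (hb : ∀ h ∈ hs, h.length = 8 ∧ ∀ y ∈ h, ∃ n : Nat, n < 16 ∧ y = (n : Int))
    (b : Nat) (hb32 : b < 32) :
    decide ((PySem.Set.ofList (hs.map (fun (h : List Int) =>
        PySem.Int.band (PySem.List.pyGetD h (PySem.Int.floordiv (b : Int) 4) 0 >>> (PySem.Int.mod (b : Int) 4).toNat) 1))).length = 1)
    = (PySem.Int.band ((hs.foldl (fun a h => PySem.Int.band a (pvPk h)) 4294967295) >>> b) 1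
        == PySem.Int.band ((hs.foldl (fun a h => PySem.Int.bor a (pvPk h)) 0) >>> b) 1) := by
  have hbr := fun h hh => pvHBridge h (hb h hh) b hb32
  have hmap : hs.map (fun (h : List Int) =>
        PySem.Int.band (PySem.List.pyGetD h (PySem.Int.floordiv (b : Int) 4) 0 >>> (PySem.Int.mod (b : Int) 4).toNat) 1)
      = (hs.map (fun h => (pvPk h).toNat.testBit b)).map (fun v => cond v (1 : Int) 0) := by
    rw [List.map_map]
    exact List.map_congr_left (fun h hh => (hbr h hh).1)
  rw [hmap]
  have hbsne : hs.map (fun h => (pvPk h).toNat.testBit b) ≠ [] := by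
    simpa using hne
  have hL : decide ((PySem.Set.ofList ((hs.map (fun h => (pvPk h).toNat.testBit b)).map (fun v => cond v (1 : Int) 0))).length = 1)
      = decide ((hs.map (fun h => (pvPk h).toNat.testBit b)).all id
            = (hs.map (fun h => (pvPk h).toNat.testBit b)).any id) :=
    decide_eq_decide.2 ((pvSetLen1 _).trans (pvAllAny _ hbsne))
  rw [hL]
  have hcst : ∀ h ∈ hs, pvPk h = ((pvPk h).toNat : Int) := fun h hh => (hbr h hh).2
  rw [show (4294967295 : Int) = ((4294967295 : Nat) : Int) from by norm_num,
    pvFoldBandCast hs _ hcst,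
    show (0 : Int) = ((0 : Nat) : Int) from rfl,
    pvFoldBorCast hs _ hcst, pvBitex, pvBitex]
  rw [show hs.foldl (fun a h => a &&& (pvPk h).toNat) 4294967295
        = (hs.map (fun h => (pvPk h).toNat)).foldl (fun a n => a &&& n) 4294967295 from List.foldl_map.symm,
    show hs.foldl (fun a h => a ||| (pvPk h).toNat) 0
        = (hs.map (fun h => (pvPk h).toNat)).foldl (fun a n => a ||| n) 0 from List.foldl_map.symm,
    pvFoldAnd, pvFoldOr]
  have hstart : (4294967295 : Nat).testBit b = true := by
    rw [show (4294967295 : Nat) = 2 ^ 32 - 1 from by norm_num, Nat.testBit_two_pow_sub_one]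
    simpa using hb32
  rw [hstart, Nat.zero_testBit, Bool.true_and, Bool.false_or]
  have hall : (hs.map (fun h => (pvPk h).toNat)).all (fun n => n.testBit b)
      = (hs.map (fun h => (pvPk h).toNat.testBit b)).all id := by
    simp [List.all_map, Function.comp_def]
  have hany : (hs.map (fun h => (pvPk h).toNat)).any (fun n => n.testBit b)
      = (hs.map (fun h => (pvPk h).toNat.testBit b)).any id := by
    simp [List.any_map, Function.comp_def]
  rw [hall, hany]
  cases hx : (hs.map (fun h => (pvPk h).toNat.testBit b)).all id <;>
    cases hy : (hs.map (fun h => (pvPk h).toNat.testBit b)).any id <;> simp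

-- ===== VERDICT (by name: the statement is the Claim_ definition above) =====
set_option maxHeartbeats 2000000 in
theorem measure_stable_bits_spec : Claim_equal_measure_stable_bits := by
  intro W vw nr _ _
  unfold Spec_measure_stable_bits measure_stable_bits measure_stable_bits_alt
  simp only [pvSha4_eq]
  simp only [PySem.List.foldl_append_singleton_eq_map, List.nil_append,
    PySem.List.foldl_append_ite_eq_filter]
  rw [PySem.List.foldl_prod_mk (f := fun a e => PySem.Int.band a (pvPk (sha4 (PySem.List.pySetD W vw e) nr)))
      (g := fun a e => PySem.Int.bor a (pvPk (sha4 (PySem.List.pySetD W vw e) nr)))]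
  dsimp only
  refine congrArg PySem.Set.ofList ?_
  apply List.filter_congr
  intro bp hbp
  obtain ⟨hge, hlt⟩ := PySem.List.mem_pyRange_one.mp hbp
  have hmapne : (PySem.List.pyRange 0 16).map (fun x => sha4 (PySem.List.pySetD W vw x) nr) ≠ [] := by
    simp only [ne_eq, List.map_eq_nil_iff]
    decide
  have hmem : ∀ h ∈ (PySem.List.pyRange 0 16).map (fun x => sha4 (PySem.List.pySetD W vw x) nr),
      h.length = 8 ∧ ∀ y ∈ h, ∃ n : Nat, n < 16 ∧ y = (n : Int) := by
    intro h hh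
    obtain ⟨v, _, rfl⟩ := List.mem_map.mp hh
    exact pvSha4_spec _ _
  rw [show bp = ((bp.toNat : Nat) : Int) from (Int.toNat_of_nonneg hge).symm]
  simp only [Int.toNat_natCast]
  rw [show (PySem.List.pyRange 0 16).foldl
        (fun a e => PySem.Int.band a (pvPk (sha4 (PySem.List.pySetD W vw e) nr))) 4294967295
      = ((PySem.List.pyRange 0 16).map (fun x => sha4 (PySem.List.pySetD W vw x) nr)).foldl
        (fun a h => PySem.Int.band a (pvPk h)) 4294967295 from List.foldl_map.symm,
    show (PySem.List.pyRange 0 16).foldl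
        (fun a e => PySem.Int.bor a (pvPk (sha4 (PySem.List.pySetD W vw e) nr))) 0
      = ((PySem.List.pyRange 0 16).map (fun x => sha4 (PySem.List.pySetD W vw x) nr)).foldl
        (fun a h => PySem.Int.bor a (pvPk h)) 0 from List.foldl_map.symm]
  exact pvCore _ hmapne hmem bp.toNat (by omega)
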